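-- pv_equiv track=rewrite | github.com/know-nothing/parse-cik | data_parsers/pre_analitycs.py | get_parties_from_res_arr
-- ===== SOURCE A (Python) =====
-- def get_parties_from_res_arr(res_arr):
--     parties_stage = False
--     arr_out = []
--     for i in range(1, len(res_arr)):
--         if parties_stage & (res_arr[i][2].strip() != '-----'):
--             arr_out.append(res_arr[i])
--         if res_arr[i][2].strip() == '-----':
--             parties_stage = True
--     return arr_out
-- ===== SOURCE B (Python) =====
-- def get_parties_from_res_arr(res_arr):
--     # phase 1: locate the first sentinel row among rows 1..n-1
--     rows = res_arr[1:]
--     for start, row in enumerate(rows):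
--         if row[2].strip() == '-----':
--             # phase 2: keep every later non-sentinel row
--             return [r for r in rows[start + 1:] if r[2].strip() != '-----']
--     return []
-- ===== Notes on version B (the rewrite author's own statement) =====
-- stated objective: simpler
-- what changed: Replaced the stateful boolean-flag scan with a two-phase decomposition: recursively locate the first sentinel row in res_arr[1:], then return a filter comprehension over the remaining rows.
import Mathlib
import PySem

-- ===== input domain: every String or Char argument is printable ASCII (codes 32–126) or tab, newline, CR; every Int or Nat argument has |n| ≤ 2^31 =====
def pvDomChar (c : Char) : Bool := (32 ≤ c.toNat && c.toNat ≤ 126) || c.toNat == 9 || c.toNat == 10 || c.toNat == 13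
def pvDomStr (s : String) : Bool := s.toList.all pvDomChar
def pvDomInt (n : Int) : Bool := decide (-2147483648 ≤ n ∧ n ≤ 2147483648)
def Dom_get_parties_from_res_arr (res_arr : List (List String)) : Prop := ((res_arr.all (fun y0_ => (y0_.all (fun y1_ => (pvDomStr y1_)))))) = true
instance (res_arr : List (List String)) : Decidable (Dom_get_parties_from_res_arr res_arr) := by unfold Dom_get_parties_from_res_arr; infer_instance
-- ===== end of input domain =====

-- B replaces the stateful boolean-flag scan with a recursive locate-the-sentinel phase
-- followed by a filter over the remaining rows (objective: simpler decomposition).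


-- ===== PORT A =====
-- loop body of A: res_arr[i][2].strip() ported with pyGetD (total form; Pre_ guarantees the
-- index 2 is in range — Python raises IndexError otherwise, excluded by Pre_)
def pvBodyA (st : Bool × List (List String)) (row : List String) : Bool × List (List String) :=
  let c := PySem.Str.strip (PySem.List.pyGetD row 2 "")
  let st1 := if st.1 && !(c == "-----") then (st.1, st.2 ++ [row]) else st
  if c == "-----" then (true, st1.2) else st1

def get_parties_from_res_arr (res_arr : List (List String)) : List (List String) :=
  ((PySem.List.pyRange 1 (PySem.List.len res_arr) 1).foldl
    (fun st i => pvBodyA st (PySem.List.pyGetD res_arr i []))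
    (false, [])).2

-- ===== PORT B =====
-- _collect_after_sentinel: recursive locate, then a filter comprehension
def pvCollectAfterSentinel : List (List String) → List (List String)
  | [] => []
  | head :: rest =>
    if PySem.Str.strip (PySem.List.pyGetD head 2 "") == "-----" then
      rest.filter (fun r => !(PySem.Str.strip (PySem.List.pyGetD r 2 "") == "-----"))
    else pvCollectAfterSentinel rest

def get_parties_from_res_arr_alt (res_arr : List (List String)) : List (List String) :=
  pvCollectAfterSentinel (PySem.List.slice res_arr (some 1) none)

-- ===== PRECONDITION & SPEC =====
-- Pre_ excludes exactly the inputs where Python A raises IndexError: a row at index ≥ 1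
-- with fewer than 3 entries (row 0 is never dereferenced).
def Pre_get_parties_from_res_arr (res_arr : List (List String)) : Prop :=
  ∀ row ∈ res_arr.drop 1, 2 < row.length
instance (res_arr : List (List String)) : Decidable (Pre_get_parties_from_res_arr res_arr) := by unfold Pre_get_parties_from_res_arr; infer_instance

def pvWitness_get_parties_from_res_arr : List (List String) :=
  [["h1", "h2", "h3"], ["a", "b", "-----"], ["p", "q", "r"]]

def Spec_get_parties_from_res_arr (res_arr : List (List String)) (out : List (List String)) : Prop := out = get_parties_from_res_arr_alt res_arr
instance (res_arr : List (List String)) (out : List (List String)) : Decidable (Spec_get_parties_from_res_arr res_arr out) := by unfold Spec_get_parties_from_res_arr; infer_instance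

-- ===== CLAIM (what is proved, stated in full; the proofs are below) =====
def Claim_equal_get_parties_from_res_arr : Prop := ∀ (res_arr : List (List String)), Dom_get_parties_from_res_arr res_arr → Pre_get_parties_from_res_arr res_arr → Spec_get_parties_from_res_arr res_arr (get_parties_from_res_arr res_arr)

-- ===== LEMMAS AND PROOFS =====

-- once the flag is true, A's loop appends exactly the non-sentinel rows, in order
theorem pvFoldA_true (rows : List (List String)) (acc : List (List String)) :
    rows.foldl pvBodyA (true, acc)
      = (true, acc ++ rows.filter (fun r => !(PySem.Str.strip (PySem.List.pyGetD r 2 "") == "-----"))) := by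
  induction rows generalizing acc with
  | nil => simp
  | cons head rest ih =>
    simp only [List.foldl_cons, List.filter_cons]
    by_cases h : PySem.Str.strip (PySem.List.pyGetD head 2 "") = "-----"
    · simp [pvBodyA, h, ih]
    · simp [pvBodyA, h, ih]

-- before the flag is set, A's loop collects exactly what B's locate-then-filter returns
theorem pvFoldA_false (rows : List (List String)) (acc : List (List String)) :
    (rows.foldl pvBodyA (false, acc)).2 = acc ++ pvCollectAfterSentinel rows := by
  induction rows generalizing acc with
  | nil => simp [pvCollectAfterSentinel]
  | cons head rest ih =>
    simp only [List.foldl_cons]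
    by_cases h : PySem.Str.strip (PySem.List.pyGetD head 2 "") = "-----"
    · simp [pvBodyA, h, pvCollectAfterSentinel, pvFoldA_true]
    · simp [pvBodyA, h, pvCollectAfterSentinel, ih]

-- ===== VERDICT (by name: the statement is the Claim_ definition above) =====
theorem get_parties_from_res_arr_spec : Claim_equal_get_parties_from_res_arr := by
  intro res_arr _ _
  unfold Spec_get_parties_from_res_arr
  unfold get_parties_from_res_arr get_parties_from_res_arr_alt
  rw [show (PySem.List.pyRange 1 (PySem.List.len res_arr) 1).foldl
        (fun st i => pvBodyA st (PySem.List.pyGetD res_arr i []))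
        (false, [])
      = (res_arr.drop (1 : Int).toNat).foldl pvBodyA (false, []) from
      PySem.List.foldl_pyRange_pyGetD res_arr [] pvBodyA (false, []) (by norm_num)]
  rw [PySem.List.slice_from_one, pvFoldA_false, ← List.drop_one]
  simp
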